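-- pv_equiv track=rewrite | github.com/direvus/adventofcode | y2022/d15.py | subtract_rect
-- ===== SOURCE A (Python) =====
-- def disjoint(a: tuple, b: tuple):
--     return (a[1] < b[0] or b[1] < a[0] or
--             a[3] < b[2] or b[3] < a[2])
--
-- def divide_axis(box: tuple, axis: int, low: int, high: int) -> tuple:
--     i = axis * 2
--     a, b = box[i: i + 2]
--     if high < a or low > b:
--         return box, set()
--
--     outers = set()
--     if low > a:
--         new = list(box)
--         new[i + 1] = low - 1
--         outers.add(tuple(new))
--
--         box = list(box)
--         box[i] = low
--
--     if high < b:
--         new = list(box)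
--         new[i] = high + 1
--         outers.add(tuple(new))
--
--         box = list(box)
--         box[i + 1] = high
--
--     return tuple(box), outers
--
-- def divide(a: tuple, b: tuple) -> set[tuple]:
--     result = set()
--     for axis in range(2):
--         i = axis * 2
--         low, high = b[i: i + 2]
--         inner, outers = divide_axis(a, axis, low, high)
--         result |= outers
--         a = inner
--     result.add(a)
--     return result
--
-- def subtract_rect(regions: set, rect: tuple) -> set:
--     """Remove a rectangular region from a set of rectangular regions.
--
--     Return a new set of regions that excludes all of the space contained by
--     `rect`.
--     """
--     result = set()
--     for region in regions:
--         if disjoint(region, rect):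
--             result.add(region)
--             continue
--         # Split the region up into subregions so that each subregion is either
--         # fully disjoint from, or fully contained by, `rect`. Then, add only
--         # those regions that are disjoint to the final result.
--         subs = divide(region, rect)
--         result |= {x for x in subs if disjoint(x, rect)}
--     return result
-- ===== SOURCE B (Python) =====
-- def overlaps(a, b):
--     return a[0] <= b[1] and b[0] <= a[1] and a[2] <= b[3] and b[2] <= a[3]
--
--
-- def carve(box, rect, axes):
--     """Carve `box` along `rect`, axis by axis: emit the margins of `box` lying
--     outside `rect`'s extent on the first axis, then recurse on the box clamped
--     to that extent; once the axes run out the fully clamped box is the part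
--     covered by `rect` and is dropped."""
--     if not axes:
--         return []
--     i = axes[0] * 2
--     a, b = box[i], box[i + 1]
--     lo, hi = rect[i], rect[i + 1]
--     pieces = []
--     if a < lo:
--         pieces.append(box[:i] + (a, lo - 1) + box[i + 2:])
--     if hi < b:
--         pieces.append(box[:i] + (hi + 1, b) + box[i + 2:])
--     clamped = box[:i] + (max(a, lo), min(b, hi)) + box[i + 2:]
--     return pieces + carve(clamped, rect, axes[1:])
--
--
-- def subtract_rect(regions: set, rect: tuple) -> set:
--     """Remove a rectangular region from a set of rectangular regions.
--
--     Return a new set of regions that excludes all of the space contained by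
--     `rect`.
--     """
--     result = set()
--     for region in regions:
--         if overlaps(region, rect):
--             result.update(carve(region, rect, (0, 1)))
--         else:
--             result.add(region)
--     return result
-- ===== Notes on version B (the rewrite author's own statement) =====
-- stated objective: alternative
-- what changed: Replaced the per-axis divide/divide_axis splitting with its inner/outer set plumbing and final disjointness filter by a generic recursive carve over the axes that emits the outside margins at each level and simply drops the fully clamped core, so no filtering pass and no set unions of intermediate pieces are needed.
-- intended difference: On inputs whose rect has inverted (empty) bounds on some axis yet passes the pairwise overlap test against some region, A's result includes that region's degenerate clamped core rectangle with inverted bounds (it survives A's disjointness filter), while B returns only the genuine margin rectangles covering the same cells; B's is intended because an empty rectangle with inverted bounds should never appear in a set of regions. — e.g. on subtract_rect([(0, 2, 0, 2)], (2, 1, 0, 2)): A returns [(0, 1, 0, 2), (2, 2, 0, 2), (2, 1, 0, 2)], B returns [(0, 1, 0, 2), (2, 2, 0, 2)]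
import Mathlib
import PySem

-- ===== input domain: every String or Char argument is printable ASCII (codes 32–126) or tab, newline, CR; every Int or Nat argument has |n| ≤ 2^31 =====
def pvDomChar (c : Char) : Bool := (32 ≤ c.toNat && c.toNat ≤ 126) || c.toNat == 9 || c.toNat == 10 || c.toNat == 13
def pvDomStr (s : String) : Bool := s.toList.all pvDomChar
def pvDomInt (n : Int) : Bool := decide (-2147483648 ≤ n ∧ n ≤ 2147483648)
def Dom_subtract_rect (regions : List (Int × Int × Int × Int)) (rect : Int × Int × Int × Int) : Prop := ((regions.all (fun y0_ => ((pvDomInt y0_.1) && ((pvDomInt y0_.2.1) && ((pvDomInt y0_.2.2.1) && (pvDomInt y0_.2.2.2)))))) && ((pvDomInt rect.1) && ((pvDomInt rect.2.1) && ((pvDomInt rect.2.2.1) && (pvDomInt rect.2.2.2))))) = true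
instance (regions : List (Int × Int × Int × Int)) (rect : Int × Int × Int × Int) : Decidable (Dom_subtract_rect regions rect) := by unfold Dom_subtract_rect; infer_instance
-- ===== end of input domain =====

-- B replaces the per-axis divide/divide_axis splitting machinery and its final disjointness
-- filter by a generic recursive carve over the axes that emits the outside margins at each
-- level and drops the fully clamped core; on empty (inverted) rects that still pass the
-- pairwise overlap test A additionally returns a degenerate core rectangle (stated as D_).


-- ===== PORT A =====
-- disjoint(a, b)
def pyDisjoint (a b : Int × Int × Int × Int) : Bool :=
  decide (a.2.1 < b.1) || decide (b.2.1 < a.1) ||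
  decide (a.2.2.2 < b.2.2.1) || decide (b.2.2.2 < a.2.2.1)

-- divide_axis(box, axis, low, high); the tuple indexing box[i:i+2]/new[i] is expanded per
-- axis value (the Python only ever calls it with axis in range(2)).
def divideAxis (box : Int × Int × Int × Int) (axis : Int) (low high : Int) :
    (Int × Int × Int × Int) × PySem.Set (Int × Int × Int × Int) :=
  if axis = 0 then
    let a := box.1
    let b := box.2.1
    if high < a ∨ low > b then (box, PySem.Set.empty)
    else
      let outers : PySem.Set (Int × Int × Int × Int) := PySem.Set.empty
      let p := if low > a then
          ((low, box.2.1, box.2.2.1, box.2.2.2),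
           PySem.Set.add outers (box.1, low - 1, box.2.2.1, box.2.2.2))
        else (box, outers)
      let box := p.1
      let outers := p.2
      let q := if high < b then
          ((box.1, high, box.2.2.1, box.2.2.2),
           PySem.Set.add outers (high + 1, box.2.1, box.2.2.1, box.2.2.2))
        else (box, outers)
      q
  else
    let a := box.2.2.1
    let b := box.2.2.2
    if high < a ∨ low > b then (box, PySem.Set.empty)
    else
      let outers : PySem.Set (Int × Int × Int × Int) := PySem.Set.empty
      let p := if low > a then
          ((box.1, box.2.1, low, box.2.2.2),
           PySem.Set.add outers (box.1, box.2.1, box.2.2.1, low - 1))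
        else (box, outers)
      let box := p.1
      let outers := p.2
      let q := if high < b then
          ((box.1, box.2.1, box.2.2.1, high),
           PySem.Set.add outers (box.1, box.2.1, high + 1, box.2.2.2))
        else (box, outers)
      q

-- divide(a, b): the loop `for axis in range(2)` unrolled to its two iterations.
def divide (a b : Int × Int × Int × Int) : PySem.Set (Int × Int × Int × Int) :=
  let result : PySem.Set (Int × Int × Int × Int) := PySem.Set.empty
  let p0 := divideAxis a 0 b.1 b.2.1
  let result := PySem.Set.union result p0.2
  let a := p0.1
  let p1 := divideAxis a 1 b.2.2.1 b.2.2.2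
  let result := PySem.Set.union result p1.2
  let a := p1.1
  PySem.Set.add result a

def subtract_rect (regions : List (Int × Int × Int × Int)) (rect : Int × Int × Int × Int) : List (Int × Int × Int × Int) :=
  regions.foldl (fun result region =>
    if pyDisjoint region rect then PySem.Set.add result region
    else
      let subs := divide region rect
      PySem.Set.union result (subs.filter (fun x => pyDisjoint x rect)))
    PySem.Set.empty

-- ===== PORT B =====
-- overlaps(a, b)
def pyOverlaps (a b : Int × Int × Int × Int) : Bool :=
  decide (a.1 ≤ b.2.1) && decide (b.1 ≤ a.2.1) &&
  decide (a.2.2.1 ≤ b.2.2.2) && decide (b.2.2.1 ≤ a.2.2.2)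

-- carve(box, rect, axes); the generic tuple slicing box[:i] + (…) + box[i+2:] is expanded
-- per value of the head axis (the Python only ever passes axes drawn from (0, 1)).
def carve (box rect : Int × Int × Int × Int) : List Nat → List (Int × Int × Int × Int)
  | [] => []
  | axis :: rest =>
      match axis with
      | 0 =>
          let a := box.1
          let b := box.2.1
          let lo := rect.1
          let hi := rect.2.1
          let pieces := (if a < lo then [(a, lo - 1, box.2.2.1, box.2.2.2)] else []) ++
                        (if hi < b then [(hi + 1, b, box.2.2.1, box.2.2.2)] else [])
          pieces ++ carve (max a lo, min b hi, box.2.2.1, box.2.2.2) rect rest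
      | _ =>
          let a := box.2.2.1
          let b := box.2.2.2
          let lo := rect.2.2.1
          let hi := rect.2.2.2
          let pieces := (if a < lo then [(box.1, box.2.1, a, lo - 1)] else []) ++
                        (if hi < b then [(box.1, box.2.1, hi + 1, b)] else [])
          pieces ++ carve (box.1, box.2.1, max a lo, min b hi) rect rest

def subtract_rect_alt (regions : List (Int × Int × Int × Int)) (rect : Int × Int × Int × Int) : List (Int × Int × Int × Int) :=
  regions.foldl (fun result region =>
    if pyOverlaps region rect then PySem.Set.union result (carve region rect [0, 1])
    else PySem.Set.add result region)
    PySem.Set.empty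

-- ===== PRECONDITION & SPEC =====
-- On inputs whose rect has inverted (empty) bounds on some axis yet passes the pairwise
-- overlap test against some region, A's result includes that region's degenerate clamped
-- core rectangle with inverted bounds (it survives A's disjointness filter), while B
-- returns only the genuine margin rectangles covering the same cells; B's is intended
-- because an empty rectangle should never appear in a set of regions.
def D_subtract_rect (regions : List (Int × Int × Int × Int)) (rect : Int × Int × Int × Int) : Prop :=
  (rect.2.1 < rect.1 ∨ rect.2.2.2 < rect.2.2.1) ∧
  ∃ r ∈ regions, ¬(r.2.1 < rect.1 ∨ rect.2.1 < r.1 ∨ r.2.2.2 < rect.2.2.1 ∨ rect.2.2.2 < r.2.2.1)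
instance (regions : List (Int × Int × Int × Int)) (rect : Int × Int × Int × Int) : Decidable (D_subtract_rect regions rect) := by unfold D_subtract_rect; infer_instance

def Spec_subtract_rect (regions : List (Int × Int × Int × Int)) (rect : Int × Int × Int × Int) (out : List (Int × Int × Int × Int)) : Prop := ¬ D_subtract_rect regions rect → out = subtract_rect_alt regions rect
instance (regions : List (Int × Int × Int × Int)) (rect : Int × Int × Int × Int) (out : List (Int × Int × Int × Int)) : Decidable (Spec_subtract_rect regions rect out) := by unfold Spec_subtract_rect; infer_instance

def pvDiffWitness_subtract_rect : (List (Int × Int × Int × Int)) × (Int × Int × Int × Int) :=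
  ([(0, 2, 0, 2)], (2, 1, 0, 2))
def pvDiffWitnessOut_subtract_rect : (List (Int × Int × Int × Int)) × (List (Int × Int × Int × Int)) :=
  ([(0, 1, 0, 2), (2, 2, 0, 2), (2, 1, 0, 2)], [(0, 1, 0, 2), (2, 2, 0, 2)])

-- ===== CLAIM (what is proved, stated in full; the proofs are below) =====
def Claim_unchanged_subtract_rect : Prop := ∀ (regions : List (Int × Int × Int × Int)) (rect : Int × Int × Int × Int), Dom_subtract_rect regions rect → Spec_subtract_rect regions rect (subtract_rect regions rect)
def Claim_changed_subtract_rect : Prop := Dom_subtract_rect (pvDiffWitness_subtract_rect.1) (pvDiffWitness_subtract_rect.2) ∧ D_subtract_rect (pvDiffWitness_subtract_rect.1) (pvDiffWitness_subtract_rect.2) ∧ subtract_rect (pvDiffWitness_subtract_rect.1) (pvDiffWitness_subtract_rect.2) = pvDiffWitnessOut_subtract_rect.1 ∧ subtract_rect_alt (pvDiffWitness_subtract_rect.1) (pvDiffWitness_subtract_rect.2) = pvDiffWitnessOut_subtract_rect.2 ∧ pvDiffWitnessOut_subtract_rect.1 ≠ pvDiffWitnessOut_subtract_rect.2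

-- ===== LEMMAS AND PROOFS =====
theorem overlaps_not_disjoint (a b : Int × Int × Int × Int) :
    pyOverlaps a b = !(pyDisjoint a b) := by
  rw [Bool.eq_iff_iff]
  simp only [pyOverlaps, pyDisjoint, Bool.and_eq_true, Bool.not_eq_true', Bool.or_eq_false_iff,
    decide_eq_true_eq, decide_eq_false_iff_not]
  omega

theorem divideAxis0_eq (x0 x1 y0 y1 rx0 rx1 : Int) (h1 : rx0 ≤ x1) (h2 : x0 ≤ rx1) :
    divideAxis (x0, x1, y0, y1) 0 rx0 rx1 =
      ((max x0 rx0, min x1 rx1, y0, y1),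
       (if x0 < rx0 then [(x0, rx0 - 1, y0, y1)] else []) ++
       (if rx1 < x1 then [(rx1 + 1, x1, y0, y1)] else [])) := by
  unfold divideAxis
  rw [if_pos rfl]
  dsimp only
  rw [if_neg (by omega)]
  rcases lt_or_ge x0 rx0 with h | h <;> rcases lt_or_ge rx1 x1 with h' | h'
  · rw [if_pos (by omega : rx0 > x0)]
    dsimp only
    rw [if_pos (by omega : rx1 < x1)]
    rw [PySem.Set.add_of_not_mem (show (x0, rx0 - 1, y0, y1) ∉ (PySem.Set.empty : PySem.Set (Int × Int × Int × Int)) by simp [PySem.Set.empty])]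
    rw [PySem.Set.add_of_not_mem (show (rx1 + 1, x1, y0, y1) ∉ ((PySem.Set.empty : PySem.Set (Int × Int × Int × Int)) ++ [(x0, rx0 - 1, y0, y1)]) by simp only [PySem.Set.empty, List.nil_append, List.mem_singleton, Prod.mk.injEq, not_and]; intros; omega)]
    rw [if_pos h, if_pos h', max_eq_right h.le, min_eq_right h'.le]
    simp [PySem.Set.empty]
  · rw [if_pos (by omega : rx0 > x0)]
    dsimp only
    rw [if_neg (by omega : ¬ rx1 < x1)]
    rw [PySem.Set.add_of_not_mem (by simp)]
    rw [if_pos h, if_neg (by omega : ¬ rx1 < x1), max_eq_right h.le, min_eq_left h']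
    simp [PySem.Set.empty]
  · rw [if_neg (by omega : ¬ rx0 > x0)]
    dsimp only
    rw [if_pos (by omega : rx1 < x1)]
    rw [PySem.Set.add_of_not_mem (by simp)]
    rw [if_neg (by omega : ¬ x0 < rx0), if_pos h', max_eq_left h, min_eq_right h'.le]
    simp [PySem.Set.empty]
  · rw [if_neg (by omega : ¬ rx0 > x0)]
    dsimp only
    rw [if_neg (by omega : ¬ rx1 < x1)]
    rw [if_neg (by omega : ¬ x0 < rx0), if_neg (by omega : ¬ rx1 < x1),
        max_eq_left h, min_eq_left h']
    simp

theorem divideAxis1_eq (a0 a1 y0 y1 ry0 ry1 : Int) (h3 : ry0 ≤ y1) (h4 : y0 ≤ ry1) :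
    divideAxis (a0, a1, y0, y1) 1 ry0 ry1 =
      ((a0, a1, max y0 ry0, min y1 ry1),
       (if y0 < ry0 then [(a0, a1, y0, ry0 - 1)] else []) ++
       (if ry1 < y1 then [(a0, a1, ry1 + 1, y1)] else [])) := by
  unfold divideAxis
  rw [if_neg (by omega)]
  dsimp only
  rw [if_neg (by omega)]
  rcases lt_or_ge y0 ry0 with h | h <;> rcases lt_or_ge ry1 y1 with h' | h'
  · rw [if_pos (by omega : ry0 > y0)]
    dsimp only
    rw [if_pos (by omega : ry1 < y1)]
    rw [PySem.Set.add_of_not_mem (show (a0, a1, y0, ry0 - 1) ∉ (PySem.Set.empty : PySem.Set (Int × Int × Int × Int)) by simp [PySem.Set.empty])]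
    rw [PySem.Set.add_of_not_mem (show (a0, a1, ry1 + 1, y1) ∉ ((PySem.Set.empty : PySem.Set (Int × Int × Int × Int)) ++ [(a0, a1, y0, ry0 - 1)]) by simp only [PySem.Set.empty, List.nil_append, List.mem_singleton, Prod.mk.injEq, not_and]; intros; omega)]
    rw [if_pos h, if_pos h', max_eq_right h.le, min_eq_right h'.le]
    simp [PySem.Set.empty]
  · rw [if_pos (by omega : ry0 > y0)]
    dsimp only
    rw [if_neg (by omega : ¬ ry1 < y1)]
    rw [PySem.Set.add_of_not_mem (show (a0, a1, y0, ry0 - 1) ∉ (PySem.Set.empty : PySem.Set (Int × Int × Int × Int)) by simp [PySem.Set.empty])]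
    rw [if_pos h, if_neg (by omega : ¬ ry1 < y1), max_eq_right h.le, min_eq_left h']
    simp [PySem.Set.empty]
  · rw [if_neg (by omega : ¬ ry0 > y0)]
    dsimp only
    rw [if_pos (by omega : ry1 < y1)]
    rw [PySem.Set.add_of_not_mem (show (a0, a1, ry1 + 1, y1) ∉ (PySem.Set.empty : PySem.Set (Int × Int × Int × Int)) by simp [PySem.Set.empty])]
    rw [if_neg (by omega : ¬ y0 < ry0), if_pos h', max_eq_left h, min_eq_right h'.le]
    simp [PySem.Set.empty]
  · rw [if_neg (by omega : ¬ ry0 > y0)]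
    dsimp only
    rw [if_neg (by omega : ¬ ry1 < y1)]
    rw [if_neg (by omega : ¬ y0 < ry0), if_neg (by omega : ¬ ry1 < y1),
        max_eq_left h, min_eq_left h']
    simp

set_option maxHeartbeats 2000000 in
theorem divide_subs_eq (x0 x1 y0 y1 rx0 rx1 ry0 ry1 : Int)
    (h1 : rx0 ≤ x1) (h2 : x0 ≤ rx1) (h3 : ry0 ≤ y1) (h4 : y0 ≤ ry1) :
    divide (x0, x1, y0, y1) (rx0, rx1, ry0, ry1) =
      ((if x0 < rx0 then [(x0, rx0 - 1, y0, y1)] else []) ++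
       (if rx1 < x1 then [(rx1 + 1, x1, y0, y1)] else [])) ++
      ((if y0 < ry0 then [(max x0 rx0, min x1 rx1, y0, ry0 - 1)] else []) ++
       (if ry1 < y1 then [(max x0 rx0, min x1 rx1, ry1 + 1, y1)] else [])) ++
      [(max x0 rx0, min x1 rx1, max y0 ry0, min y1 ry1)] := by
  unfold divide
  dsimp only
  rw [divideAxis0_eq x0 x1 y0 y1 rx0 rx1 h1 h2]
  dsimp only
  rw [divideAxis1_eq (max x0 rx0) (min x1 rx1) y0 y1 ry0 ry1 h3 h4]
  dsimp only
  split_ifs <;>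
    simp_all [PySem.Set.union, PySem.Set.update, PySem.Set.empty, PySem.Set.add_eq_ite,
      Prod.ext_iff] <;>
    split_ifs <;> simp_all <;> omega

theorem pyDisjoint_inner (x0 x1 y0 y1 rx0 rx1 ry0 ry1 : Int)
    (h1 : rx0 ≤ x1) (h2 : x0 ≤ rx1) (h3 : ry0 ≤ y1) (h4 : y0 ≤ ry1) :
    pyDisjoint (max x0 rx0, min x1 rx1, max y0 ry0, min y1 ry1) (rx0, rx1, ry0, ry1) =
      (decide (rx1 < rx0) || decide (ry1 < ry0)) := by
  rw [Bool.eq_iff_iff]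
  simp only [pyDisjoint, Bool.or_eq_true, decide_eq_true_eq]
  omega

theorem carve_eq (x0 x1 y0 y1 rx0 rx1 ry0 ry1 : Int) :
    carve (x0, x1, y0, y1) (rx0, rx1, ry0, ry1) [0, 1] =
      ((if x0 < rx0 then [(x0, rx0 - 1, y0, y1)] else []) ++
       (if rx1 < x1 then [(rx1 + 1, x1, y0, y1)] else [])) ++
      (((if y0 < ry0 then [(max x0 rx0, min x1 rx1, y0, ry0 - 1)] else []) ++
        (if ry1 < y1 then [(max x0 rx0, min x1 rx1, ry1 + 1, y1)] else [])) ++ []) := by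
  rfl

theorem pv_union_foldl {α : Type} [BEq α] (s t : List α) :
    PySem.Set.union s t = t.foldl PySem.Set.add s := rfl

theorem pv_filter_ite_singleton {α : Type} (p : α → Bool) (c : Prop) [Decidable c] (a : α)
    (h : p a = true) :
    List.filter p (if c then [a] else []) = (if c then [a] else []) := by
  split_ifs <;> simp [h]

-- A's and B's per-region step agree whenever the rect is not inverted or the region is disjoint.
theorem step_eq (rx0 rx1 ry0 ry1 x0 x1 y0 y1 : Int) (s : PySem.Set (Int × Int × Int × Int))
    (hok : ¬(rx1 < rx0 ∨ ry1 < ry0) ∨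
      pyDisjoint (x0, x1, y0, y1) (rx0, rx1, ry0, ry1) = true) :
    (if pyDisjoint (x0, x1, y0, y1) (rx0, rx1, ry0, ry1) then PySem.Set.add s (x0, x1, y0, y1)
     else PySem.Set.union s ((divide (x0, x1, y0, y1) (rx0, rx1, ry0, ry1)).filter
        (fun x => pyDisjoint x (rx0, rx1, ry0, ry1)))) =
    (if pyOverlaps (x0, x1, y0, y1) (rx0, rx1, ry0, ry1) then
        PySem.Set.union s (carve (x0, x1, y0, y1) (rx0, rx1, ry0, ry1) [0, 1])
     else PySem.Set.add s (x0, x1, y0, y1)) := by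
  rw [overlaps_not_disjoint]
  by_cases hd : pyDisjoint (x0, x1, y0, y1) (rx0, rx1, ry0, ry1) = true
  · rw [hd]; simp
  · have hok' : ¬(rx1 < rx0 ∨ ry1 < ry0) := hok.resolve_right hd
    rw [Bool.not_eq_true] at hd
    rw [hd]
    simp only [Bool.not_false, if_true, Bool.false_eq_true, if_false]
    have hnd := hd
    simp only [pyDisjoint, Bool.or_eq_false_iff, decide_eq_false_iff_not, not_lt] at hnd
    obtain ⟨⟨⟨hn1, hn2⟩, hn3⟩, hn4⟩ := hnd
    rw [divide_subs_eq x0 x1 y0 y1 rx0 rx1 ry0 ry1 (by omega) (by omega) (by omega) (by omega)]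
    rw [carve_eq]
    rw [List.filter_append, List.filter_append, List.filter_append, List.filter_append]
    rw [pv_filter_ite_singleton (fun x => pyDisjoint x (rx0, rx1, ry0, ry1)) (x0 < rx0) ((x0, rx0 - 1, y0, y1))
        (by simp only [pyDisjoint, Bool.or_eq_true, decide_eq_true_eq]; omega)]
    rw [pv_filter_ite_singleton (fun x => pyDisjoint x (rx0, rx1, ry0, ry1)) (rx1 < x1) ((rx1 + 1, x1, y0, y1))
        (by simp only [pyDisjoint, Bool.or_eq_true, decide_eq_true_eq]; omega)]
    rw [pv_filter_ite_singleton (fun x => pyDisjoint x (rx0, rx1, ry0, ry1)) (y0 < ry0) ((max x0 rx0, min x1 rx1, y0, ry0 - 1))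
        (by simp only [pyDisjoint, Bool.or_eq_true, decide_eq_true_eq]; omega)]
    rw [pv_filter_ite_singleton (fun x => pyDisjoint x (rx0, rx1, ry0, ry1)) (ry1 < y1) ((max x0 rx0, min x1 rx1, ry1 + 1, y1))
        (by simp only [pyDisjoint, Bool.or_eq_true, decide_eq_true_eq]; omega)]
    rw [show List.filter (fun x => pyDisjoint x (rx0, rx1, ry0, ry1))
          [(max x0 rx0, min x1 rx1, max y0 ry0, min y1 ry1)] = [] from by
      simp only [List.filter_cons, List.filter_nil, pyDisjoint_inner x0 x1 y0 y1 rx0 rx1 ry0 ry1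
        (by omega) (by omega) (by omega) (by omega)]
      rw [if_neg (by simp only [Bool.or_eq_true, decide_eq_true_eq]; omega)]]
    rw [pv_union_foldl, pv_union_foldl]
    simp only [List.append_nil, List.foldl_append]

-- Folding the two step functions over the region list keeps equal accumulators as long as
-- every region satisfies step_eq's hypothesis.
theorem foldl_step_eq (rx0 rx1 ry0 ry1 : Int) (l : List (Int × Int × Int × Int))
    (hok : ∀ r ∈ l, ¬(rx1 < rx0 ∨ ry1 < ry0) ∨ pyDisjoint r (rx0, rx1, ry0, ry1) = true) :
    ∀ s : PySem.Set (Int × Int × Int × Int),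
    l.foldl (fun result region =>
      if pyDisjoint region (rx0, rx1, ry0, ry1) then PySem.Set.add result region
      else PySem.Set.union result ((divide region (rx0, rx1, ry0, ry1)).filter
        (fun x => pyDisjoint x (rx0, rx1, ry0, ry1)))) s =
    l.foldl (fun result region =>
      if pyOverlaps region (rx0, rx1, ry0, ry1) then
        PySem.Set.union result (carve region (rx0, rx1, ry0, ry1) [0, 1])
      else PySem.Set.add result region) s := by
  induction l with
  | nil => intro s; rfl
  | cons r t ih =>
    intro s
    obtain ⟨x0, x1, y0, y1⟩ := r
    simp only [List.foldl_cons]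
    rw [step_eq rx0 rx1 ry0 ry1 x0 x1 y0 y1 s (hok _ List.mem_cons_self)]
    exact ih (fun r hr => hok r (List.mem_cons_of_mem _ hr)) _

-- ===== VERDICT (by name: the statements are the Claim_ definitions above) =====
theorem subtract_rect_spec : Claim_unchanged_subtract_rect := by
  intro regions rect _ hD
  show subtract_rect regions rect = subtract_rect_alt regions rect
  obtain ⟨rx0, rx1, ry0, ry1⟩ := rect
  unfold subtract_rect subtract_rect_alt
  apply foldl_step_eq
  intro r hr
  by_cases hinv : rx1 < rx0 ∨ ry1 < ry0
  · right
    simp only [pyDisjoint, Bool.or_eq_true, decide_eq_true_eq]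
    by_contra hc
    simp only [not_or, not_lt] at hc
    exact hD ⟨hinv, ⟨r, hr, by dsimp only; omega⟩⟩
  · exact Or.inl hinv

theorem subtract_rect_changed : Claim_changed_subtract_rect := by
  unfold Claim_changed_subtract_rect
  refine ⟨by decide, by decide, by decide, ?_, by decide⟩
  show subtract_rect_alt pvDiffWitness_subtract_rect.1 pvDiffWitness_subtract_rect.2 =
    pvDiffWitnessOut_subtract_rect.2
  unfold pvDiffWitness_subtract_rect pvDiffWitnessOut_subtract_rect subtract_rect_alt
  simp only [List.foldl_cons, List.foldl_nil]
  rw [if_pos (by decide), carve_eq]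
  decide
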